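-- pv_equiv track=rewrite | github.com/B1lli/BillyGPT | main.py | cut_message
-- ===== SOURCE A (Python) =====
-- def cut_message(message) :
--     '''
--     剪切接收到的message，如果超过4000token长度就从最早的消息开始剪切，剪切到小于4000token为止
--     :param message:
--     :return:
--     '''
--     total_length = 0
--
--     # Iterate over contents in the list
--     for message_dict in message :
--         # message_dict['content'] = message_dict['content']
--
--         # 计算content长度
--         if message_dict['content'].isalpha () :
--             length = len ( message_dict['content'].split () )
--         else :
--             length = len ( message_dict['content'] )
--
--         total_length += length
--
--     while total_length > 4000:
--         if not message:raise Exception('最后一条消息长度大于4000字符了，请编辑消息或重置对话')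
--         removed_content = message.pop(0)
--         removed_length = len ( removed_content['content'] )
--         if removed_content['content'].isalpha () :
--             removed_length = len ( removed_content['content'].split () )
--         total_length -= removed_length
--
--
--     return message
-- ===== SOURCE B (Python) =====
-- def cut_message(message):
--     '''Trim earliest messages until total token length <= 4000.
--     Same in-place mutation as the original (leading messages are deleted from the list).'''
--     def mlen(d):
--         c = d['content']
--         return len(c.split()) if c.isalpha() else len(c)
--     lengths = [mlen(d) for d in message]
--     kept = 0
--     k = len(message)
--     for i in range(len(message) - 1, -1, -1):
--         if kept + lengths[i] > 4000:
--             break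
--         kept += lengths[i]
--         k = i
--     del message[:k]
--     return message
-- ===== Notes on version B (the rewrite author's own statement) =====
-- stated objective: simpler
-- what changed: A sums all lengths then repeatedly pops the first message while the total exceeds 4000; B computes the per-message lengths once, scans from the end to find how many trailing messages fit within 4000, and deletes the leading ones in a single slice (same in-place mutation).
import Mathlib
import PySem

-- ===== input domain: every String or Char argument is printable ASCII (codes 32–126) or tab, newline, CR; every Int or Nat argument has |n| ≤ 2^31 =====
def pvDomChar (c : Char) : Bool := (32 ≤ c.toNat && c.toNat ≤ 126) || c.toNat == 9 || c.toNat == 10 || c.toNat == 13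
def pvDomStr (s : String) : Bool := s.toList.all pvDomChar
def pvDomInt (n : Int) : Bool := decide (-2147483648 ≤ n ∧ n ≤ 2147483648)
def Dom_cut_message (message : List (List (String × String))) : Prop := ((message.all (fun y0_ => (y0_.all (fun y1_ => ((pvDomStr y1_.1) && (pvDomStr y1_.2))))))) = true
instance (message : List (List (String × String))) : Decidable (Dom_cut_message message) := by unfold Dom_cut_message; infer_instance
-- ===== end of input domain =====

-- B replaces A's sum-then-pop-one-by-one while loop by a single reverse scan that finds how many
-- trailing messages fit in 4000 tokens and drops the leading ones in one slice (objective: simpler).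
-- Both A and B mutate the list argument in place in Python; the equivalence proved here is about the
-- return value (B performs the same mutation via `del message[:k]`).

-- ===== PORT A =====
-- message_dict['content']  (KeyError when absent — excluded by Pre_; "" there is never hit inside Pre_)
def pvContentA (d : List (String × String)) : String :=
  ((PySem.Dict.mk d).get? "content").getD ""

-- length rule of A's for-loop: len(c.split()) if c.isalpha() else len(c)
def pvLenA (c : String) : Int :=
  if PySem.Str.strIsalpha c then ((PySem.Str.split₀ c).length : Int) else PySem.Str.len c

-- A's pop branch: removed_length = len(c); if c.isalpha(): removed_length = len(c.split())
def pvRemovedLen (d : List (String × String)) : Int :=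
  let c := pvContentA d
  let r := PySem.Str.len c
  if PySem.Str.strIsalpha c then ((PySem.Str.split₀ c).length : Int) else r

-- the while loop: pop(0) while total > 4000.  Python raises on an empty list with total > 4000;
-- that state is unreachable (total is the sum of the remaining nonnegative lengths): the [] branch
-- returns [] only formally.
def pvCutLoop : List (List (String × String)) → Int → List (List (String × String))
  | [], total => if total > 4000 then [] else []
  | d :: rest, total =>
      if total > 4000 then pvCutLoop rest (total - pvRemovedLen d) else d :: rest

def cut_message (message : List (List (String × String))) : List (List (String × String)) :=
  let total := message.foldl (fun t d => t + pvLenA (pvContentA d)) 0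
  pvCutLoop message total

-- ===== PORT B =====
-- mlen(d) of Source B
def pvMlen (d : List (String × String)) : Int :=
  let c := ((PySem.Dict.mk d).get? "content").getD ""
  if PySem.Str.strIsalpha c then ((PySem.Str.split₀ c).length : Int) else PySem.Str.len c

-- Source B's backwards for-loop, expressed on the reversed length list: how many trailing
-- messages are kept (k of Source B is message.length - this count)
def pvKeepCount : List Int → Int → Nat
  | [], _ => 0
  | l :: rest, kept => if kept + l > 4000 then 0 else pvKeepCount rest (kept + l) + 1

def cut_message_alt (message : List (List (String × String))) : List (List (String × String)) :=
  let lengths := message.map pvMlen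
  let keep := pvKeepCount lengths.reverse 0
  message.drop (message.length - keep)

-- ===== PRECONDITION & SPEC =====
-- Pre_ excludes exactly the messages missing a 'content' key, on which Python A raises KeyError.
def Pre_cut_message (message : List (List (String × String))) : Prop :=
  ∀ d ∈ message, (PySem.Dict.mk d).contains "content" = true
instance (message : List (List (String × String))) : Decidable (Pre_cut_message message) := by
  unfold Pre_cut_message; infer_instance

def pvWitness_cut_message : (List (List (String × String))) := [[("content", "hi"), ("role", "user")]]

def Spec_cut_message (message : List (List (String × String))) (out : List (List (String × String))) : Prop := out = cut_message_alt message
instance (message : List (List (String × String))) (out : List (List (String × String))) : Decidable (Spec_cut_message message out) := by unfold Spec_cut_message; infer_instance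

-- ===== CLAIM (what is proved, stated in full; the proofs are below) =====
def Claim_equal_cut_message : Prop := ∀ (message : List (List (String × String))), Dom_cut_message message → Pre_cut_message message → Spec_cut_message message (cut_message message)

-- ===== LEMMAS AND PROOFS =====

lemma pvRemovedLen_eq (d : List (String × String)) : pvRemovedLen d = pvMlen d := by
  simp only [pvRemovedLen, pvMlen, pvContentA]

lemma pvLenA_content_eq (d : List (String × String)) : pvLenA (pvContentA d) = pvMlen d := by
  simp only [pvLenA, pvMlen, pvContentA]

lemma pvMlen_nonneg (d : List (String × String)) : 0 ≤ pvMlen d := by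
  unfold pvMlen
  dsimp only
  split <;> simp [PySem.Str.len_eq]

lemma pvKeepCount_le (l : List Int) (acc : Int) : pvKeepCount l acc ≤ l.length := by
  induction l generalizing acc with
  | nil => simp [pvKeepCount]
  | cons x r ih =>
      simp only [pvKeepCount, List.length_cons]
      split
      · omega
      · exact Nat.succ_le_succ (ih _)

lemma pvKeepCount_full (l : List Int) (acc : Int) (h0 : ∀ x ∈ l, 0 ≤ x)
    (hs : acc + l.sum ≤ 4000) : pvKeepCount l acc = l.length := by
  induction l generalizing acc with
  | nil => simp [pvKeepCount]
  | cons x r ih =>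
      have hx : 0 ≤ x := h0 x (List.mem_cons_self)
      have hr : ∀ y ∈ r, 0 ≤ y := fun y hy => h0 y (List.mem_cons_of_mem _ hy)
      have hrs : 0 ≤ r.sum := List.sum_nonneg hr
      simp only [List.sum_cons] at hs
      have hnot : ¬ acc + x > 4000 := by omega
      simp only [pvKeepCount, if_neg hnot, List.length_cons]
      exact congrArg Nat.succ (ih _ hr (by omega))

lemma pvKeepCount_append (r s : List Int) (acc : Int) :
    pvKeepCount (r ++ s) acc =
      if pvKeepCount r acc = r.length then r.length + pvKeepCount s (acc + r.sum)
      else pvKeepCount r acc := by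
  induction r generalizing acc with
  | nil => simp [pvKeepCount]
  | cons x r' ih =>
      simp only [List.cons_append, List.length_cons, List.sum_cons, pvKeepCount]
      by_cases h : acc + x > 4000
      · rw [if_pos h, if_pos h, if_neg (by omega : ¬ (0 = r'.length + 1))]
      · rw [if_neg h, if_neg h, ih (acc + x)]
        by_cases hfull : pvKeepCount r' (acc + x) = r'.length
        · rw [if_pos hfull,
            if_pos (by omega : pvKeepCount r' (acc + x) + 1 = r'.length + 1)]
          have hsum : acc + x + r'.sum = acc + (x + r'.sum) := by ring
          rw [hsum]
          omega
        · rw [if_neg hfull,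
            if_neg (by omega : ¬ (pvKeepCount r' (acc + x) + 1 = r'.length + 1))]

lemma pvCutLoop_eq (msgs : List (List (String × String))) :
    pvCutLoop msgs ((msgs.map pvMlen).sum) =
      msgs.drop (msgs.length - pvKeepCount ((msgs.map pvMlen).reverse) 0) := by
  induction msgs with
  | nil => simp [pvCutLoop, pvKeepCount]
  | cons d rest ih =>
      have hx : 0 ≤ pvMlen d := pvMlen_nonneg d
      have h0 : ∀ x ∈ ((rest.map pvMlen).reverse ++ [pvMlen d]), 0 ≤ x := by
        intro x hx'
        rcases List.mem_append.mp hx' with h | h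
        · rcases List.mem_reverse.mp h with h
          rcases List.mem_map.mp h with ⟨e, _, rfl⟩
          exact pvMlen_nonneg e
        · simp at h; subst h; exact hx
      simp only [List.map_cons, List.sum_cons, List.reverse_cons, List.length_cons]
      by_cases h : pvMlen d + (rest.map pvMlen).sum > 4000
      · -- A pops the head; B's reverse scan stops before the head
        have hkc : pvKeepCount ((rest.map pvMlen).reverse ++ [pvMlen d]) 0
            = pvKeepCount ((rest.map pvMlen).reverse) 0 := by
          rw [pvKeepCount_append]
          split
          · next hfull =>
              have hsum : (0 : Int) + ((rest.map pvMlen).reverse).sum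
                  = (rest.map pvMlen).sum := by simp
              have hgt : ¬ ((0 : Int) + ((rest.map pvMlen).reverse).sum + pvMlen d ≤ 4000) := by
                rw [hsum]; omega
              simp only [pvKeepCount]
              rw [if_pos (by omega : (0:Int) + ((rest.map pvMlen).reverse).sum + pvMlen d > 4000)]
              simp [hfull]
          · rfl
        have hle : pvKeepCount ((rest.map pvMlen).reverse) 0 ≤ rest.length := by
          have := pvKeepCount_le ((rest.map pvMlen).reverse) 0
          simpa using this
        rw [hkc]
        have hdrop : rest.length + 1 - pvKeepCount ((rest.map pvMlen).reverse) 0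
            = (rest.length - pvKeepCount ((rest.map pvMlen).reverse) 0) + 1 := by omega
        rw [hdrop]
        simp only [pvCutLoop, if_pos h, List.drop_succ_cons]
        rw [pvRemovedLen_eq]
        have harg : pvMlen d + (rest.map pvMlen).sum - pvMlen d = (rest.map pvMlen).sum := by ring
        rw [harg]
        exact ih
      · -- everything fits: A's loop body never runs, B keeps the whole list
        have hkc : pvKeepCount ((rest.map pvMlen).reverse ++ [pvMlen d]) 0
            = rest.length + 1 := by
          have := pvKeepCount_full ((rest.map pvMlen).reverse ++ [pvMlen d]) 0 h0 (by simp; omega)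
          simpa using this
        rw [hkc]
        simp [pvCutLoop, h]

lemma pvTotal_eq (msgs : List (List (String × String))) :
    msgs.foldl (fun t d => t + pvLenA (pvContentA d)) 0 = (msgs.map pvMlen).sum := by
  have h : ∀ (a : Int), msgs.foldl (fun t d => t + pvLenA (pvContentA d)) a
      = a + (msgs.map pvMlen).sum := by
    induction msgs with
    | nil => intro a; simp
    | cons d rest ih =>
        intro a
        rw [List.foldl_cons, ih, pvLenA_content_eq]
        simp only [List.map_cons, List.sum_cons]
        ring
  simpa using h 0

-- ===== VERDICT (by name: the statement is the Claim_ definition above) =====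
theorem cut_message_spec : Claim_equal_cut_message := by
  intro message _ _
  unfold Spec_cut_message cut_message cut_message_alt
  simp only [pvTotal_eq]
  exact pvCutLoop_eq message
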